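-- pv_equiv track=rewrite | github.com/JohannesFranzMaastricht/randomPythonScripts | knapsack3bags.py | powerSet2
-- ===== SOURCE A (Python) =====
-- def powerSet2(items):
--     """returns a generator"""
--     N = len(items)
--     # enumerate the 2**N possible combinations
--     for i in range(3**N):
--         combo = ([], [])
--         for j in range(N):
--             # test bit jth of integer i
--             if (i // 3**j) % 3 == 1:
--                 combo[0].append(items[j])
--             if (i // 3**j) % 3 == 2:
--                 combo[1].append(items[j])
--         yield combo
-- ===== SOURCE B (Python) =====
-- def powerSet2(items):
--     """returns a generator"""
--     def rec(j):
--         # assignments of items[0..j]; item with the highest index branches outermost,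
--         # so item 0 varies fastest, matching base-3 counting order
--         if j < 0:
--             yield ([], [])
--             return
--         for choice in (0, 1, 2):
--             for bag0, bag1 in rec(j - 1):
--                 if choice == 1:
--                     bag0.append(items[j])
--                 elif choice == 2:
--                     bag1.append(items[j])
--                 yield (bag0, bag1)
--     yield from rec(len(items) - 1)
-- ===== Notes on version B (the rewrite author's own statement) =====
-- stated objective: alternative
-- what changed: Replaced the flat loop over all 3^N base-3 counters (each re-decoding every digit) with a recursion over the items that branches each item into neither/bag0/bag1, the highest index outermost so item 0 still varies fastest.
import Mathlib
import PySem

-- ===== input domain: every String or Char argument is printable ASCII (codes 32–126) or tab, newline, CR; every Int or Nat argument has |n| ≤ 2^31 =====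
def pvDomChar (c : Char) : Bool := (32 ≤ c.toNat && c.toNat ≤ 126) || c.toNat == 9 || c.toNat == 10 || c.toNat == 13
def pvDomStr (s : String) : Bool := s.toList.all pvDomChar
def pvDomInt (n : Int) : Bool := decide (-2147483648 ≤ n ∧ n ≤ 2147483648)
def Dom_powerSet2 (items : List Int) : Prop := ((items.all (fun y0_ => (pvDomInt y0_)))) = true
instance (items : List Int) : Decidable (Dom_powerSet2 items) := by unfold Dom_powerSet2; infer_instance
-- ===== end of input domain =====

-- B replaces A's flat base-3 counter (3^N outer iterations, each re-decoding all N digits)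
-- with a recursion on the items that branches each item into neither/bag0/bag1 (objective:
-- alternative decomposition; both materialise A's generator as a list of pairs).

-- ===== PORT A =====
-- A: for i in range(3**N): decode digit j of i in base 3 to place items[j].
-- 3**j is ported as (3:Int) ^ j.toNat, exact since j ranges over 0..N-1 (nonnegative);
-- items[j] is ported with pyGetD (always in range here).
def powerSet2 (items : List Int) : List (List Int × List Int) :=
  let N := items.length
  (PySem.List.pyRange 0 ((3 ^ N : Nat) : Int) 1).map (fun i =>
    (PySem.List.pyRange 0 (N : Int) 1).foldl (fun combo j =>
      let combo := if PySem.Int.mod (PySem.Int.floordiv i ((3 : Int) ^ j.toNat)) 3 == 1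
        then (combo.1 ++ [PySem.List.pyGetD items j 0], combo.2) else combo
      if PySem.Int.mod (PySem.Int.floordiv i ((3 : Int) ^ j.toNat)) 3 == 2
        then (combo.1, combo.2 ++ [PySem.List.pyGetD items j 0]) else combo)
      (([], []) : List Int × List Int))

-- ===== PORT B =====
-- B: rec(j) enumerates assignments of items[0..j]; here indexed by the count k of items
-- taken (rec(j) = powerSet2AltRec items (j+1)). The three choices of the last item are the
-- outer loop (flatMap over [0,1,2]), the recursive combos the inner one, as in Source B.
def powerSet2AltRec (items : List Int) : Nat → List (List Int × List Int)
  | 0 => [([], [])]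
  | k + 1 =>
    ([0, 1, 2] : List Nat).flatMap (fun c =>
      (powerSet2AltRec items k).map (fun p =>
        if c == 1 then (p.1 ++ [PySem.List.pyGetD items (k : Int) 0], p.2)
        else if c == 2 then (p.1, p.2 ++ [PySem.List.pyGetD items (k : Int) 0])
        else p))

def powerSet2_alt (items : List Int) : List (List Int × List Int) :=
  powerSet2AltRec items items.length

-- ===== PRECONDITION & SPEC =====
def Spec_powerSet2 (items : List Int) (out : List (List Int × List Int)) : Prop := out = powerSet2_alt items
instance (items : List Int) (out : List (List Int × List Int)) : Decidable (Spec_powerSet2 items out) := by unfold Spec_powerSet2; infer_instance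

-- ===== CLAIM (what is proved, stated in full; the proofs are below) =====
def Claim_equal_powerSet2 : Prop := ∀ (items : List Int), Dom_powerSet2 items → Spec_powerSet2 items (powerSet2 items)

-- ===== LEMMAS AND PROOFS =====

-- A's inner loop body and inner fold, as proof-local helpers (definitionally A's lambda).
def stepF (items : List Int) (i : Int) (combo : List Int × List Int) (j : Int) : List Int × List Int :=
  let combo := if PySem.Int.mod (PySem.Int.floordiv i ((3 : Int) ^ j.toNat)) 3 == 1
    then (combo.1 ++ [PySem.List.pyGetD items j 0], combo.2) else combo
  if PySem.Int.mod (PySem.Int.floordiv i ((3 : Int) ^ j.toNat)) 3 == 2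
    then (combo.1, combo.2 ++ [PySem.List.pyGetD items j 0]) else combo

def F (items : List Int) (n : Nat) (i : Int) : List Int × List Int :=
  (PySem.List.pyRange 0 (n : Int) 1).foldl (stepF items i) ([], [])

theorem A_as_F (items : List Int) :
    powerSet2 items = (List.range (3 ^ items.length)).map (fun k : Nat => F items items.length (k : Int)) := by
  simp only [powerSet2]
  rw [PySem.List.pyRange_zero_nat (3 ^ items.length), List.map_map]
  rfl

-- Python's (i // 3**j) % 3 on a Nat-cast i, in Nat arithmetic.
theorem digit_cast (m j : Nat) :
    PySem.Int.mod (PySem.Int.floordiv (m : Int) ((3 : Int) ^ j)) 3 = ((m / 3 ^ j % 3 : Nat) : Int) := by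
  have h1 : ((3 : Int) ^ j) = ((3 ^ j : Nat) : Int) := by push_cast; ring
  rw [h1, PySem.Int.floordiv_natCast]
  exact_mod_cast PySem.Int.mod_natCast (m / 3 ^ j) 3

theorem nat_digit_lo (c n r j : Nat) (hj : j < n) :
    (c * 3 ^ n + r) / 3 ^ j % 3 = r / 3 ^ j % 3 := by
  obtain ⟨t, rfl⟩ : ∃ t, n = j + t + 1 := ⟨n - j - 1, by omega⟩
  have h : c * 3 ^ (j + t + 1) + r = r + 3 ^ j * (3 * (c * 3 ^ t)) := by ring
  rw [h, Nat.add_mul_div_left _ _ (Nat.pow_pos (by norm_num)), Nat.add_mul_mod_self_left]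

theorem nat_digit_hi (c n r : Nat) (hc : c < 3) (hr : r < 3 ^ n) :
    (c * 3 ^ n + r) / 3 ^ n % 3 = c := by
  rw [Nat.mul_comm, Nat.add_comm, Nat.add_mul_div_left _ _ (Nat.pow_pos (by norm_num)),
    Nat.div_eq_of_lt hr, Nat.zero_add, Nat.mod_eq_of_lt hc]

-- digits below n of c*3^n + r coincide with those of r, so A's inner fold agrees.
theorem F_lo (items : List Int) (n c r : Nat) :
    F items n ((c * 3 ^ n + r : Nat) : Int) = F items n ((r : Nat) : Int) := by
  unfold F
  apply PySem.List.foldl_congr_mem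
  intro acc j hj
  obtain ⟨h0, hn⟩ := (PySem.List.mem_pyRange_one).mp hj
  obtain ⟨m, rfl⟩ : ∃ m : Nat, j = (m : Int) := ⟨j.toNat, by omega⟩
  have hm : m < n := by exact_mod_cast hn
  unfold stepF
  rw [show ((m : Int)).toNat = m from Int.toNat_natCast m]
  rw [digit_cast, digit_cast, nat_digit_lo c n r m hm]

theorem F_succ (items : List Int) (n : Nat) (i : Int) :
    F items (n + 1) i = stepF items i (F items n i) (n : Int) := by
  unfold F
  rw [show ((n + 1 : Nat) : Int) = (n : Int) + 1 by push_cast; ring,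
    PySem.List.pyRange_one_succ_right (Int.natCast_nonneg n), List.foldl_append]
  rfl

theorem stepF_digit (items : List Int) (c n r : Nat) (hc : c < 3) (hr : r < 3 ^ n)
    (p : List Int × List Int) :
    stepF items ((c * 3 ^ n + r : Nat) : Int) p (n : Int) =
      if c == 1 then (p.1 ++ [PySem.List.pyGetD items (n : Int) 0], p.2)
      else if c == 2 then (p.1, p.2 ++ [PySem.List.pyGetD items (n : Int) 0])
      else p := by
  unfold stepF
  rw [show ((n : Int)).toNat = n from Int.toNat_natCast n, digit_cast, nat_digit_hi c n r hc hr]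
  interval_cases c <;> simp

theorem point_lemma (items : List Int) (n c k : Nat) (hc : c < 3) (hk : k < 3 ^ n) :
    F items (n + 1) ((c * 3 ^ n + k : Nat) : Int) =
      if c == 1 then ((F items n (k : Int)).1 ++ [PySem.List.pyGetD items (n : Int) 0], (F items n (k : Int)).2)
      else if c == 2 then ((F items n (k : Int)).1, (F items n (k : Int)).2 ++ [PySem.List.pyGetD items (n : Int) 0])
      else F items n (k : Int) := by
  rw [F_succ, F_lo, stepF_digit items c n k hc hk]

theorem main_lemma (items : List Int) (n : Nat) :
    (List.range (3 ^ n)).map (fun k : Nat => F items n (k : Int)) = powerSet2AltRec items n := by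
  induction n with
  | zero =>
    simp [powerSet2AltRec, F, PySem.List.pyRange_one_eq_nil]
  | succ n ih =>
    have q0 : (List.range (3 ^ n)).map (fun k : Nat => F items (n + 1) (k : Int)) =
        powerSet2AltRec items n := by
      rw [← ih]
      apply List.map_congr_left
      intro k hk
      have h := point_lemma items n 0 k (by norm_num) (List.mem_range.mp hk)
      simpa using h
    have q1 : (List.range (3 ^ n)).map (fun k : Nat => F items (n + 1) ((3 ^ n + k : Nat) : Int)) =
        (powerSet2AltRec items n).map (fun p =>
          (p.1 ++ [PySem.List.pyGetD items (n : Int) 0], p.2)) := by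
      rw [← ih, List.map_map]
      apply List.map_congr_left
      intro k hk
      have h := point_lemma items n 1 k (by norm_num) (List.mem_range.mp hk)
      simpa using h
    have q2 : (List.range (3 ^ n)).map (fun k : Nat => F items (n + 1) ((3 ^ n + (3 ^ n + k) : Nat) : Int)) =
        (powerSet2AltRec items n).map (fun p =>
          (p.1, p.2 ++ [PySem.List.pyGetD items (n : Int) 0])) := by
      rw [← ih, List.map_map]
      apply List.map_congr_left
      intro k hk
      have h := point_lemma items n 2 k (by norm_num) (List.mem_range.mp hk)
      rw [show 2 * 3 ^ n + k = 3 ^ n + (3 ^ n + k) by ring] at h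
      simpa using h
    have h3 : 3 ^ (n + 1) = 3 ^ n + (3 ^ n + 3 ^ n) := by ring
    rw [h3, List.range_add, List.range_add, List.map_append, List.map_append, List.map_append,
      List.map_map, List.map_map, List.map_map]
    simp only [Function.comp_def]
    rw [q0, q1, q2]
    simp [powerSet2AltRec, List.flatMap]

-- ===== VERDICT (by name: the statement is the Claim_ definition above) =====
theorem powerSet2_spec : Claim_equal_powerSet2 := by
  intro items _
  unfold Spec_powerSet2
  rw [A_as_F, main_lemma]
  rfl
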